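-- pv_equiv track=rewrite | github.com/JonathanHuangg/ForFun | questionSet1.py | breakPallindrome
-- ===== SOURCE A (Python) =====
-- def breakPallindrome(string):
--     manipulated = [s for s in string]
--     letters = ["a", "b", "c", "d", "e", "f", "g", "h", "i", "j", "k", "l", "m", "n", "o", "p", "q", "r", "s"
--                "t", "u", "v", "w", "x", "y", "z"]
--
--     for letter in letters:
--         for x in range(len(string) // 2):
--             if manipulated[x] != letter:
--                 manipulated[x] = letter
--                 return str(manipulated)
--     return "IMPOSSIBLE"
-- ===== SOURCE B (Python) =====
-- def breakPallindrome(string):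
--     n = len(string) // 2
--     if n == 0:
--         return "IMPOSSIBLE"
--     chars = list(string)
--     for i in range(n):
--         if chars[i] != 'a':
--             chars[i] = 'a'
--             return str(chars)
--     chars[0] = 'b'
--     return str(chars)
-- ===== Notes on version B (the rewrite author's own statement) =====
-- stated objective: simpler
-- what changed: Drops A's 26-letter outer loop (which can only ever act on its first two letters) for a single pass over the first half looking for a non-'a' character, with an explicit set-index-0-to-'b' fallback.
import Mathlib
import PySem

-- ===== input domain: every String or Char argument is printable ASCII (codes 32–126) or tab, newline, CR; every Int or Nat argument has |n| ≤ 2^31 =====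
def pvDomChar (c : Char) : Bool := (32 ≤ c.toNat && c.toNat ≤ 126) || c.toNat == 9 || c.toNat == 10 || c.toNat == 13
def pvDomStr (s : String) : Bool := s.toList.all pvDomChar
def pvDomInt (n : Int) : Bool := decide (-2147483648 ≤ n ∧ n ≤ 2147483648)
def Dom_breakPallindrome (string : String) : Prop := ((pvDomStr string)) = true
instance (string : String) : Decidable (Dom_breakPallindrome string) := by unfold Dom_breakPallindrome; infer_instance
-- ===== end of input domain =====

-- B replaces A's 26-letter outer loop (only its first two letters can ever act) by one pass over
-- the first half looking for a non-'a' char, with an explicit index-0 → 'b' fallback: simpler.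


-- shared helper: Python's str() of a list of one-character strings (repr of each char, exact on ASCII incl. tab/newline/CR)
def pyReprChar (c : Char) : String :=
  if c = '\'' then "\"'\""
  else "'" ++ (if c = '\\' then "\\\\"
               else if c = '\t' then "\\t"
               else if c = '\n' then "\\n"
               else if c = '\r' then "\\r"
               else String.singleton c) ++ "'"

def pyReprCharList (l : List Char) : String :=
  "[" ++ String.intercalate ", " (l.map pyReprChar) ++ "]"

-- ===== PORT A =====
-- A's letters list: note "s" "t" concatenate in the Python source, so one element is "st"
def pvLettersA : List String :=
  ["a","b","c","d","e","f","g","h","i","j","k","l","m","n","o","p","q","r","st","u","v","w","x","y","z"]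

-- inner `for x in range(n)` loop of A, early return as Option
def pvInnerA (letter : String) (manip : List Char) : List Nat → Option String
  | [] => none
  | x :: xs =>
      if String.singleton (manip.getD x ' ') ≠ letter then
        some (pyReprCharList (manip.set x (letter.toList.headD ' ')))
      else pvInnerA letter manip xs

-- outer `for letter in letters` loop of A
def pvOuterA (manip : List Char) (n : Nat) : List String → Option String
  | [] => none
  | l :: ls =>
      match pvInnerA l manip (List.range n) with
      | some s => some s
      | none => pvOuterA manip n ls

def breakPallindrome (string : String) : String :=
  let manipulated := string.toList
  match pvOuterA manipulated (string.toList.length / 2) pvLettersA with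
  | some s => s
  | none => "IMPOSSIBLE"

-- ===== PORT B =====
-- B's single pass: first index i < n with chars[i] ≠ 'a'
def pvFindB (chars : List Char) : List Nat → Option Nat
  | [] => none
  | i :: is => if chars.getD i ' ' ≠ 'a' then some i else pvFindB chars is

def breakPallindrome_alt (string : String) : String :=
  let n := string.toList.length / 2
  if n = 0 then "IMPOSSIBLE"
  else
    let chars := string.toList
    match pvFindB chars (List.range n) with
    | some i => pyReprCharList (chars.set i 'a')
    | none => pyReprCharList (chars.set 0 'b')

-- ===== PRECONDITION & SPEC =====
def Spec_breakPallindrome (string : String) (out : String) : Prop := out = breakPallindrome_alt string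
instance (string : String) (out : String) : Decidable (Spec_breakPallindrome string out) := by unfold Spec_breakPallindrome; infer_instance

-- ===== CLAIM (what is proved, stated in full; the proofs are below) =====
def Claim_equal_breakPallindrome : Prop := ∀ (string : String), Dom_breakPallindrome string → Spec_breakPallindrome string (breakPallindrome string)

-- ===== LEMMAS AND PROOFS =====
theorem singleton_eq_iff (c d : Char) : String.singleton c = String.singleton d ↔ c = d := by
  constructor
  · intro h
    have := congrArg String.toList h
    simpa [String.singleton] using this
  · intro h; rw [h]

theorem inner_a_eq (manip : List Char) (idxs : List Nat) :
    pvInnerA "a" manip idxs = (pvFindB manip idxs).map (fun i => pyReprCharList (manip.set i 'a')) := by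
  induction idxs with
  | nil => rfl
  | cons x xs ih =>
      simp only [pvInnerA, pvFindB]
      have hiff : (String.singleton (manip.getD x ' ') ≠ "a") ↔ (manip.getD x ' ' ≠ 'a') := by
        have h : ("a" : String) = String.singleton 'a' := rfl
        rw [h, ne_eq, ne_eq, singleton_eq_iff]
      split_ifs with h1 h2 h2
      · simp [String.singleton]
      · exact absurd (hiff.mp h1) h2
      · exact absurd (hiff.mpr h2) h1
      · simpa using ih

theorem findB_none_head (chars : List Char) (idxs : List Nat) (h : pvFindB chars idxs = none)
    (i : Nat) (hi : i ∈ idxs) : chars.getD i ' ' = 'a' := by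
  induction idxs with
  | nil => simp at hi
  | cons x xs ih =>
      simp only [pvFindB] at h
      split_ifs at h with hx
      rcases List.mem_cons.mp hi with rfl | hmem
      · simpa using hx
      · exact ih h hmem

theorem breakPallindrome_spec_aux (string : String) :
    breakPallindrome string = breakPallindrome_alt string := by
  unfold breakPallindrome breakPallindrome_alt
  set chars := string.toList with hchars
  set n := string.toList.length / 2 with hn
  by_cases h0 : n = 0
  · simp [h0, pvOuterA, pvInnerA, pvLettersA]
  · simp only [if_neg h0]
    have hrange : List.range n = 0 :: (List.range (n - 1)).map (· + 1) := by
      obtain ⟨m, hm⟩ := Nat.exists_eq_succ_of_ne_zero h0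
      rw [hm]
      simp [List.range_succ_eq_map, Nat.succ_eq_add_one]
    simp only [pvLettersA, pvOuterA]
    rw [inner_a_eq]
    cases hfind : pvFindB chars (List.range n) with
    | some i => simp
    | none =>
        have h0mem : (0 : Nat) ∈ List.range n := by rw [hrange]; exact List.mem_cons_self
        have hc0 : chars.getD 0 ' ' = 'a' := findB_none_head chars _ hfind 0 h0mem
        have hb : pvInnerA "b" chars (List.range n) = some (pyReprCharList (chars.set 0 'b')) := by
          rw [hrange]
          simp only [pvInnerA, hc0, ne_eq]
          rw [if_pos (by decide : ¬(String.singleton 'a' = ("b" : String)))]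
          rfl
        simp only [Option.map_none, hb]

-- ===== VERDICT (by name: the statement is the Claim_ definition above) =====
theorem breakPallindrome_spec : Claim_equal_breakPallindrome := by
  intro string _
  exact breakPallindrome_spec_aux string
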